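-- pv_equiv track=rewrite | github.com/pypi-data/pypi-mirror-78 | packages/rewrite/rewrite-0.0.1.dev5-py3-none-any.whl/rewrite/problem.py | parse_method
-- ===== SOURCE A (Python) =====
-- def parse_method(contents):
--     """Methods must have three parts in order and separated by blank lines:
--     - the names of instance attributes to load as local variables and their default values
--     - the executable code
--     - the names of the local variables to bind as instance attributes."""
--
--     # Prepare the code for parsing by line numbers
--     lines = contents.splitlines()
--     total_lines = len(lines)
--     line_nbs = range(total_lines)
--
--     # Identify the indices of all of the blank lines
--     blank_lines = [nb for nb in line_nbs if lines[nb].strip() == '']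
--
--     # Search the lines for the first block of code separated by blank lines
--     for index, nb in enumerate(blank_lines):
--         if index != nb:
--             arg_start = index
--             arg_end = nb
--             break
--     # Assume that the first block of code contains the arguments for the method
--     ins = lines[arg_start:arg_end]
--     # Remove the extra set of quotes
--     ins = [s[1:-1] for s in ins if s != 'None']
--     ins = tuple(ins)
--
--     # Search the lines for the last block of code separated by blank lines
--     total_lines = len(lines)
--     reversed_blank_lines = [total_lines - nb for nb in blank_lines[::-1]]
--     for index, nb in enumerate(reversed_blank_lines):
--         if index != total_lines - nb:
--             return_start = total_lines - nb + 1
--             return_end = total_lines - index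
--             break
--     # Assume that the last block of code contains the return values for the method
--     outs = lines[return_start:return_end]
--     # Remove the extra set of quotes
--     outs = [s[1:-1] for s in outs if s != 'None']
--     outs = tuple(outs)
--
--     # Every line in between the first and last block of code is the method code
--     code = '\n'.join(lines[arg_end:return_start - 1])
--
--     return ins, code, outs
-- ===== SOURCE B (Python) =====
-- def parse_method(contents):
--     """Methods must have three parts in order and separated by blank lines:
--     - the names of instance attributes to load as local variables and their default values
--     - the executable code
--     - the names of the local variables to bind as instance attributes."""
--
--     lines = contents.splitlines()
--
--     def blank(s):
--         return s.strip() == ''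
--
--     # Drop the leading blank lines, then peel off the first non-blank block.
--     body = lines
--     while body and blank(body[0]):
--         body = body[1:]
--     ins = []
--     while body and not blank(body[0]):
--         ins.append(body[0])
--         body = body[1:]
--     if not body:
--         raise ValueError('a method needs blank-line-separated argument, code and return-value parts')
--
--     # Peel the trailing non-blank block off the end; what remains ends with the
--     # blank separator, which is dropped before joining the code.
--     outs = []
--     while body and not blank(body[-1]):
--         outs.append(body[-1])
--         body = body[:-1]
--     outs.reverse()
--     code = '\n'.join(body[:-1])
--
--     return (tuple(s[1:-1] for s in ins if s != 'None'), code,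
--             tuple(s[1:-1] for s in outs if s != 'None'))
-- ===== Notes on version B (the rewrite author's own statement) =====
-- stated objective: simpler
-- what changed: A builds the list of blank-line indices and runs two enumerate-searches over it (the second over a reversed, total-minus-index mirrored copy) plus index-slice arithmetic; B never materialises indices: it peels the line list directly (drop leading blanks, take the first non-blank run, take the trailing non-blank run off the reversed remainder) and joins what is left.
import Mathlib
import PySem

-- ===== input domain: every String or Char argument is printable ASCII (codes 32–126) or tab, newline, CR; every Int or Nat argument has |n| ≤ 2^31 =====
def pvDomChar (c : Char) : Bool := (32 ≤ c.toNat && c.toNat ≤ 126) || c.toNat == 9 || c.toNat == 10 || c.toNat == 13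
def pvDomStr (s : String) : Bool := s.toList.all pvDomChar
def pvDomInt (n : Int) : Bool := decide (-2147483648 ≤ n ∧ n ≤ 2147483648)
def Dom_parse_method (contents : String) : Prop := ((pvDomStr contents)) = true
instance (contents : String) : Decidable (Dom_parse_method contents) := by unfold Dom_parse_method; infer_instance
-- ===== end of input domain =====

-- B replaces A's two enumerate-searches over the list of blank-line indices (and its
-- reversed, mirrored copy) by a direct three-phase peel of the line list itself:
-- drop leading blanks, peel the first non-blank block, peel the trailing non-blank
-- block off the reversed remainder; no index arithmetic at all. Objective: simpler.

-- ===== PORT A =====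
-- 'for index, nb in enumerate(blank_lines): if index != nb: arg_start, arg_end = index, nb; break'
def pvFindArg : List (Int × Int) → Option (Int × Int)
  | [] => none
  | (index, nb) :: rest => if index != nb then some (index, nb) else pvFindArg rest

-- 'for index, nb in enumerate(reversed_blank_lines): if index != total_lines - nb: …; break'
def pvFindRet (total : Int) : List (Int × Int) → Option (Int × Int)
  | [] => none
  | (index, nb) :: rest =>
      if index != total - nb then some (total - nb + 1, total - index) else pvFindRet total rest

def parse_method (contents : String) : List String × String × List String :=
  let lines := PySem.Str.splitlines contents
  let total : Int := lines.length
  let line_nbs := PySem.List.pyRange 0 total 1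
  let blank_lines := line_nbs.filter (fun nb => PySem.Str.strip (PySem.List.pyGetD lines nb "") == "")
  match pvFindArg (PySem.List.enumerate blank_lines 0) with
  | none => ([], "", [])  -- Python raises UnboundLocalError here; excluded by Pre_
  | some (arg_start, arg_end) =>
    let ins := PySem.List.slice lines (some arg_start) (some arg_end)
    let ins := (ins.filter (fun s => s != "None")).map (fun s => PySem.Str.slice s (some 1) (some (-1)))
    -- blank_lines[::-1] is blank_lines.reverse (PySem.List.slice?_none_none_neg_one)
    let reversed_blank_lines := blank_lines.reverse.map (fun nb => total - nb)
    match pvFindRet total (PySem.List.enumerate reversed_blank_lines 0) with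
    | none => ([], "", [])  -- Python raises UnboundLocalError here; excluded by Pre_
    | some (return_start, return_end) =>
      let outs := PySem.List.slice lines (some return_start) (some return_end)
      let outs := (outs.filter (fun s => s != "None")).map (fun s => PySem.Str.slice s (some 1) (some (-1)))
      let code := PySem.Str.join "\n" (PySem.List.slice lines (some arg_end) (some (return_start - 1)))
      (ins, code, outs)

-- ===== PORT B =====
def pvBlank (s : String) : Bool := PySem.Str.strip s == ""

-- 'while body and blank(body[0]): body = body[1:]'
def pvDropBlanks : List String → List String
  | [] => []
  | s :: r => if pvBlank s then pvDropBlanks r else s :: r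

-- 'block = []; while body and not blank(body[0]): block.append(body[0]); body = body[1:]'
-- (peeling from the END of body is the same recursion applied to body.reverse)
def pvTakeBlock : List String → List String × List String
  | [] => ([], [])
  | s :: r => if pvBlank s then ([], s :: r) else
      let p := pvTakeBlock r
      (s :: p.1, p.2)

def parse_method_alt (contents : String) : List String × String × List String :=
  let lines := PySem.Str.splitlines contents
  let body0 := pvDropBlanks lines
  let p1 := pvTakeBlock body0
  let ins := p1.1
  if p1.2.isEmpty then ([], "", []) else  -- 'raise ValueError' in Python B; excluded by Pre_
  let p2 := pvTakeBlock p1.2.reverse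
  let outs := p2.1.reverse
  let body := p2.2.reverse
  let code := PySem.Str.join "\n" body.dropLast
  ((ins.filter (fun s => s != "None")).map (fun s => PySem.Str.slice s (some 1) (some (-1))),
   code,
   (outs.filter (fun s => s != "None")).map (fun s => PySem.Str.slice s (some 1) (some (-1))))

-- ===== PRECONDITION & SPEC =====
-- Pre_ excludes exactly the inputs where A raises UnboundLocalError: those whose lines
-- contain no blank line after a non-blank line (empty input, all-blank input, or a
-- single block not followed by any blank line).
def Pre_parse_method (contents : String) : Prop :=
  (((PySem.Str.splitlines contents).dropWhile
      (fun s => PySem.Str.strip s == "")).any (fun s => PySem.Str.strip s == "")) = true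

instance (contents : String) : Decidable (Pre_parse_method contents) := by
  unfold Pre_parse_method; infer_instance

def pvWitness_parse_method : String := "'x'\n\ncode\n\n'y'"

def Spec_parse_method (contents : String) (out : List String × String × List String) : Prop :=
  out = parse_method_alt contents
instance (contents : String) (out : List String × String × List String) : Decidable (Spec_parse_method contents out) := by unfold Spec_parse_method; infer_instance

-- ===== CLAIM (what is proved, stated in full; the proofs are below) =====
def Claim_equal_parse_method : Prop := ∀ (contents : String), Dom_parse_method contents → Pre_parse_method contents → Spec_parse_method contents (parse_method contents)


-- ===== LEMMAS AND PROOFS =====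

-- blank-line indices of a line list (the Nat-level view of A's 'blank_lines')
def pvBlanksOf (xs : List String) : List Nat :=
  (List.range xs.length).filter (fun i => pvBlank (xs.getD i ""))

theorem pvBlanksOf_append (xs ys : List String) :
    pvBlanksOf (xs ++ ys) = pvBlanksOf xs ++ (pvBlanksOf ys).map (xs.length + ·) := by
  unfold pvBlanksOf
  rw [List.length_append, List.range_add, List.filter_append]
  refine congrArg₂ (· ++ ·) ?_ ?_
  · exact List.filter_congr (fun i hi => by
      rw [List.getD_append _ _ _ i (List.mem_range.mp hi)])
  · simp only [List.filter_map]
    refine congrArg (List.map _) (List.filter_congr (fun i _ => ?_))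
    show pvBlank ((xs ++ ys).getD (xs.length + i) "") = pvBlank (ys.getD i "")
    rw [List.getD_append_right _ _ _ _ (Nat.le_add_right _ _), Nat.add_sub_cancel_left]

theorem pvBlanksOf_all_blank (xs : List String) (h : ∀ x ∈ xs, pvBlank x = true) :
    pvBlanksOf xs = List.range xs.length := by
  unfold pvBlanksOf
  apply List.filter_eq_self.mpr
  intro i hi
  have hlt := List.mem_range.mp hi
  rw [List.getD_eq_getElem _ _ hlt]
  exact h _ (xs.getElem_mem hlt)

theorem pvBlanksOf_no_blank (xs : List String) (h : ∀ x ∈ xs, pvBlank x = false) :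
    pvBlanksOf xs = [] := by
  unfold pvBlanksOf
  apply List.filter_eq_nil_iff.mpr
  intro i hi
  have hlt := List.mem_range.mp hi
  rw [List.getD_eq_getElem _ _ hlt]
  simp [h _ (xs.getElem_mem hlt)]

theorem pvFindArg_spec (L : Nat) : ∀ (k : Nat) (E : Int) (rest : List Int),
    ((k + L : Nat) : Int) < E →
    pvFindArg (PySem.List.enumerate ((List.range' k L).map (fun i : Nat => (i : Int)) ++ E :: rest) k)
      = some (((k + L : Nat) : Int), E) := by
  induction L with
  | zero =>
      intro k E rest h
      simp only [List.range', List.map_nil, List.nil_append, PySem.List.enumerate_cons]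
      have hne : (k : Int) ≠ E := by omega
      simp [pvFindArg, hne]
  | succ L ih =>
      intro k E rest h
      rw [List.range'_succ]
      simp only [List.map_cons, List.cons_append, PySem.List.enumerate_cons]
      have : pvFindArg (((k : Int), (k : Int)) :: PySem.List.enumerate
          ((List.range' (k+1) L).map (fun i : Nat => (i : Int)) ++ E :: rest) ((k : Int) + 1))
          = pvFindArg (PySem.List.enumerate
          ((List.range' (k+1) L).map (fun i : Nat => (i : Int)) ++ E :: rest) ((k : Int) + 1)) := by
        simp [pvFindArg]
      rw [this]
      have hcast : ((k : Int) + 1) = ((k + 1 : Nat) : Int) := by push_cast; ring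
      rw [hcast]
      have := ih (k+1) E rest (by omega)
      rw [this]
      congr 2
      omega

theorem pvDropBlanks_eq (xs : List String) : pvDropBlanks xs = xs.dropWhile pvBlank := by
  induction xs with
  | nil => rfl
  | cons s r ih => by_cases h : pvBlank s <;> simp [pvDropBlanks, List.dropWhile, h, ih]

theorem pvTakeBlock_eq (xs : List String) :
    pvTakeBlock xs = (xs.takeWhile (fun s => !pvBlank s), xs.dropWhile (fun s => !pvBlank s)) := by
  induction xs with
  | nil => rfl
  | cons s r ih => by_cases h : pvBlank s <;> simp [pvTakeBlock, List.takeWhile, List.dropWhile, h, ih]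

theorem pvDropWhile_app (p : String → Bool) (P : List String) (z : String) (zs : List String)
    (hP : ∀ x ∈ P, p x = true) (hz : p z = false) :
    List.dropWhile p (P ++ z :: zs) = z :: zs := by
  induction P with
  | nil => simp [hz]
  | cons a t ih =>
      simp only [List.cons_append, List.dropWhile, hP a List.mem_cons_self]
      exact ih (fun x hx => hP x (List.mem_cons_of_mem _ hx))

theorem pvTakeWhile_app (p : String → Bool) (P : List String) (z : String) (zs : List String)
    (hP : ∀ x ∈ P, p x = true) (hz : p z = false) :
    List.takeWhile p (P ++ z :: zs) = P := by
  induction P with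
  | nil => simp [hz]
  | cons a t ih =>
      simp only [List.cons_append, List.takeWhile, hP a List.mem_cons_self]
      rw [ih (fun x hx => hP x (List.mem_cons_of_mem _ hx))]

def pvAclean (xs : List String) : List String :=
  (xs.filter (fun s => s != "None")).map (fun s => PySem.Str.slice s (some 1) (some (-1)))
def pvAcore (lines : List String) : List String × String × List String :=
  match pvFindArg (PySem.List.enumerate ((PySem.List.pyRange 0 (lines.length : Int) 1).filter
      (fun nb => PySem.Str.strip (PySem.List.pyGetD lines nb "") == "")) 0) with
  | none => ([], "", [])
  | some (arg_start, arg_end) =>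
    match pvFindRet (lines.length : Int) (PySem.List.enumerate (((PySem.List.pyRange 0 (lines.length : Int) 1).filter
        (fun nb => PySem.Str.strip (PySem.List.pyGetD lines nb "") == "")).reverse.map
        (fun nb => (lines.length : Int) - nb)) 0) with
    | none => ([], "", [])
    | some (return_start, return_end) =>
      (pvAclean (PySem.List.slice lines (some arg_start) (some arg_end)),
       PySem.Str.join "\n" (PySem.List.slice lines (some arg_end) (some (return_start - 1))),
       pvAclean (PySem.List.slice lines (some return_start) (some return_end)))

def pvBcore (lines : List String) : List String × String × List String :=
  let body0 := pvDropBlanks lines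
  let p1 := pvTakeBlock body0
  let ins := p1.1
  if p1.2.isEmpty then ([], "", []) else
  let p2 := pvTakeBlock p1.2.reverse
  let outs := p2.1.reverse
  let body := p2.2.reverse
  let code := PySem.Str.join "\n" body.dropLast
  ((ins.filter (fun s => s != "None")).map (fun s => PySem.Str.slice s (some 1) (some (-1))),
   code,
   (outs.filter (fun s => s != "None")).map (fun s => PySem.Str.slice s (some 1) (some (-1))))


set_option maxHeartbeats 1000000 in
theorem pvA_eq (contents : String) : parse_method contents = pvAcore (PySem.Str.splitlines contents) := by
  unfold parse_method pvAcore pvAclean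
  rfl

theorem pvB_eq (contents : String) : parse_method_alt contents = pvBcore (PySem.Str.splitlines contents) := rfl

theorem pvAcore_eq (P B1 M T2 : List String)
    (hP : ∀ x ∈ P, pvBlank x = true)
    (hB1 : ∀ x ∈ B1, pvBlank x = false) (hB1ne : B1 ≠ [])
    (hT2 : ∀ x ∈ T2, pvBlank x = false)
    (hMne : M ≠ [])
    (hMh : pvBlank (M.head hMne) = true)
    (hMl : pvBlank (M.getLast hMne) = true) :
    pvAcore (P ++ (B1 ++ (M ++ T2))) =
      (pvAclean B1, PySem.Str.join "\n" M.dropLast, pvAclean T2) := by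
  have hlB : 0 < B1.length := List.length_pos_iff.mpr hB1ne
  have hlM : 0 < M.length := List.length_pos_iff.mpr hMne
  -- the blank-index list
  have hblanks : pvBlanksOf (P ++ (B1 ++ (M ++ T2))) =
      List.range P.length ++ (pvBlanksOf M).map ((P.length + B1.length) + ·) := by
    rw [pvBlanksOf_append, pvBlanksOf_append, pvBlanksOf_append,
        pvBlanksOf_no_blank B1 hB1, pvBlanksOf_no_blank T2 hT2,
        pvBlanksOf_all_blank P hP]
    simp only [List.map_nil, List.nil_append, List.append_nil, List.map_map]
    congr 1
    refine List.map_congr_left (fun x _ => ?_)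
    simp only [Function.comp_apply]
    omega
  have hbsM_head : pvBlanksOf M = 0 :: (pvBlanksOf M.tail).map (1 + ·) := by
    conv_lhs => rw [← List.cons_head_tail hMne,
      show M.head hMne :: M.tail = [M.head hMne] ++ M.tail from rfl]
    rw [pvBlanksOf_append]
    have h1 : pvBlanksOf [M.head hMne] = [0] := by
      simp [pvBlanksOf, List.range, List.range.loop, hMh]
    rw [h1]
    rfl
  have hbsM_last : pvBlanksOf M = pvBlanksOf M.dropLast ++ [M.length - 1] := by
    conv_lhs => rw [← List.dropLast_append_getLast hMne]
    rw [pvBlanksOf_append]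
    have h1 : pvBlanksOf [M.getLast hMne] = [0] := by
      simp [pvBlanksOf, List.range, List.range.loop, hMl]
    rw [h1]
    simp [List.length_dropLast]
  -- abbreviations
  have hE : 0 < P.length + B1.length := by omega
  -- the Int-level blank_lines list
  have hbl : (PySem.List.pyRange 0 (((P ++ (B1 ++ (M ++ T2))).length : Nat) : Int) 1).filter
        (fun nb => PySem.Str.strip (PySem.List.pyGetD (P ++ (B1 ++ (M ++ T2))) nb "") == "")
      = (pvBlanksOf (P ++ (B1 ++ (M ++ T2)))).map (fun i : Nat => (i : Int)) := by
    rw [PySem.List.pyRange_zero_natCast, List.filter_map]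
    unfold pvBlanksOf
    refine congrArg (List.map _) (List.filter_congr fun i _ => ?_)
    simp [pvBlank]
  -- shape for the first search
  have hshape1 : pvBlanksOf (P ++ (B1 ++ (M ++ T2))) =
      List.range' 0 P.length ++ (P.length + B1.length) ::
        ((pvBlanksOf M.tail).map (1 + ·)).map ((P.length + B1.length) + ·) := by
    rw [hblanks, hbsM_head, ← List.range_eq_range']
    simp
  have hloop1 : pvFindArg (PySem.List.enumerate
      ((pvBlanksOf (P ++ (B1 ++ (M ++ T2)))).map (fun i : Nat => (i : Int))) 0) =
      some ((P.length : Int), ((P.length + B1.length : Nat) : Int)) := by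
    rw [hshape1]
    simp only [List.map_append, List.map_cons]
    have := pvFindArg_spec P.length 0 ((P.length + B1.length : Nat) : Int)
      ((((pvBlanksOf M.tail).map (1 + ·)).map ((P.length + B1.length) + ·)).map (fun i : Nat => (i : Int)))
      (by push_cast; omega)
    simpa using this
  -- shape for the second search
  have hshape2 : pvBlanksOf (P ++ (B1 ++ (M ++ T2))) =
      (List.range P.length ++ (pvBlanksOf M.dropLast).map ((P.length + B1.length) + ·)) ++
        [P.length + B1.length + (M.length - 1)] := by
    rw [hblanks, hbsM_last]
    simp [List.append_assoc]
  have hloop2 : pvFindRet (((P ++ (B1 ++ (M ++ T2))).length : Nat) : Int)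
      (PySem.List.enumerate
        (((pvBlanksOf (P ++ (B1 ++ (M ++ T2)))).map (fun i : Nat => (i : Int))).reverse.map
          (fun nb => (((P ++ (B1 ++ (M ++ T2))).length : Nat) : Int) - nb)) 0) =
      some (((P.length + B1.length + M.length : Nat) : Int),
            (((P ++ (B1 ++ (M ++ T2))).length : Nat) : Int)) := by
    rw [hshape2]
    simp only [List.map_append, List.reverse_append, List.map_cons, List.reverse_cons,
      List.map_nil, List.reverse_nil, List.nil_append, List.cons_append,
      PySem.List.enumerate_cons]
    simp only [pvFindRet]
    have hcond : ((0 : Int) != (((P ++ (B1 ++ (M ++ T2))).length : Nat) : Int) -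
        ((((P ++ (B1 ++ (M ++ T2))).length : Nat) : Int) -
         ((P.length + B1.length + (M.length - 1) : Nat) : Int))) = true := by
      have : (((P ++ (B1 ++ (M ++ T2))).length : Nat) : Int) -
          ((((P ++ (B1 ++ (M ++ T2))).length : Nat) : Int) -
           ((P.length + B1.length + (M.length - 1) : Nat) : Int)) =
          ((P.length + B1.length + (M.length - 1) : Nat) : Int) := by ring
      rw [this]
      simp only [bne_iff_ne, ne_eq]
      intro hc
      have := hc.symm
      rw [Int.natCast_eq_zero] at this
      omega
    rw [hcond]
    simp only [if_true, Option.some.injEq, Prod.mk.injEq]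
    constructor
    · push_cast
      ring_nf
      omega
    · ring
  -- slices
  have hins : PySem.List.slice (P ++ (B1 ++ (M ++ T2))) (some ((P.length : Nat) : Int))
      (some ((P.length + B1.length : Nat) : Int)) = B1 := by
    rw [PySem.List.slice_natCast, show P.length + B1.length - P.length = B1.length from by omega,
        List.drop_left]
    exact List.take_left
  have hcast1 : (((P.length + B1.length + M.length : Nat) : Int) - 1)
      = ((P.length + B1.length + (M.length - 1) : Nat) : Int) := by push_cast; omega
  have hdropE : List.drop (P.length + B1.length) (P ++ (B1 ++ (M ++ T2))) = M ++ T2 := by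
    rw [show P ++ (B1 ++ (M ++ T2)) = (P ++ B1) ++ (M ++ T2) from by simp [List.append_assoc],
        show P.length + B1.length = (P ++ B1).length from by simp]
    exact List.drop_left
  have hcode : PySem.List.slice (P ++ (B1 ++ (M ++ T2)))
      (some ((P.length + B1.length : Nat) : Int))
      (some (((P.length + B1.length + M.length : Nat) : Int) - 1)) = M.dropLast := by
    rw [hcast1, PySem.List.slice_natCast,
        show P.length + B1.length + (M.length - 1) - (P.length + B1.length) = M.length - 1 from by omega,
        hdropE, List.take_append_of_le_length (by omega), ← List.dropLast_eq_take]
  have houts : PySem.List.slice (P ++ (B1 ++ (M ++ T2)))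
      (some ((P.length + B1.length + M.length : Nat) : Int))
      (some (((P ++ (B1 ++ (M ++ T2))).length : Nat) : Int)) = T2 := by
    rw [PySem.List.slice_natCast,
        show P ++ (B1 ++ (M ++ T2)) = ((P ++ B1) ++ M) ++ T2 from by simp [List.append_assoc],
        show P.length + B1.length + M.length = ((P ++ B1) ++ M).length from by simp; omega]
    rw [List.drop_left]
    rw [show (((P ++ B1) ++ M) ++ T2).length - ((P ++ B1) ++ M).length = T2.length from by
      simp; omega]
    exact List.take_length
  unfold pvAcore
  rw [hbl, hloop1, hloop2]
  simp only [hins, hcode, houts]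

theorem pvBcore_eq (P B1 M T2 : List String)
    (hP : ∀ x ∈ P, pvBlank x = true)
    (hB1 : ∀ x ∈ B1, pvBlank x = false) (hB1ne : B1 ≠ [])
    (hT2 : ∀ x ∈ T2, pvBlank x = false)
    (hMne : M ≠ [])
    (hMh : pvBlank (M.head hMne) = true)
    (hMl : pvBlank (M.getLast hMne) = true) :
    pvBcore (P ++ (B1 ++ (M ++ T2))) =
      (pvAclean B1, PySem.Str.join "\n" M.dropLast, pvAclean T2) := by
  obtain ⟨bh, bt, hB1c⟩ := List.exists_cons_of_ne_nil hB1ne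
  have hMc : M = M.head hMne :: M.tail := (List.cons_head_tail hMne).symm
  have hMr : M.reverse = M.getLast hMne :: M.dropLast.reverse := by
    conv_lhs => rw [← List.dropLast_append_getLast hMne]
    simp
  have h0 : pvDropBlanks (P ++ (B1 ++ (M ++ T2))) = B1 ++ (M ++ T2) := by
    rw [pvDropBlanks_eq, hB1c, List.cons_append]
    exact pvDropWhile_app _ P bh _ hP (hB1 bh (by rw [hB1c]; exact List.mem_cons_self))
  have h1 : pvTakeBlock (B1 ++ (M ++ T2)) = (B1, M ++ T2) := by
    rw [pvTakeBlock_eq]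
    have hz : (!pvBlank (M.head hMne)) = false := by simp [hMh]
    have hall : ∀ x ∈ B1, (!pvBlank x) = true := fun x hx => by simp [hB1 x hx]
    conv_lhs => rw [hMc, List.cons_append]
    rw [pvTakeWhile_app _ B1 _ _ hall hz, pvDropWhile_app _ B1 _ _ hall hz, ← List.cons_append,
        ← hMc]
  have h2 : pvTakeBlock ((M ++ T2).reverse) = (T2.reverse, M.reverse) := by
    rw [pvTakeBlock_eq, List.reverse_append]
    have hz : (!pvBlank (M.getLast hMne)) = false := by simp [hMl]
    have hall : ∀ x ∈ T2.reverse, (!pvBlank x) = true := fun x hx => by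
      simp [hT2 x (List.mem_reverse.mp hx)]
    conv_lhs => rw [hMr]
    rw [pvTakeWhile_app _ T2.reverse _ _ hall hz, pvDropWhile_app _ T2.reverse _ _ hall hz, ← hMr]
  have hne : (M ++ T2).isEmpty = false := by
    simp [List.isEmpty_eq_false_iff, hMne]
  unfold pvBcore
  simp only [h0, h1, hne, Bool.false_eq_true, if_false, h2, List.reverse_reverse]
  rfl

theorem pvDecomp (ls : List String)
    (hpre : (ls.dropWhile pvBlank).any pvBlank = true) :
    ∃ (P B1 M T2 : List String) (hMne : M ≠ []),
      ls = P ++ (B1 ++ (M ++ T2)) ∧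
      (∀ x ∈ P, pvBlank x = true) ∧
      (∀ x ∈ B1, pvBlank x = false) ∧ B1 ≠ [] ∧
      (∀ x ∈ T2, pvBlank x = false) ∧
      pvBlank (M.head hMne) = true ∧
      pvBlank (M.getLast hMne) = true := by
  set R := ls.dropWhile pvBlank with hRdef
  have hls : ls = ls.takeWhile pvBlank ++ R := (List.takeWhile_append_dropWhile).symm
  have hP : ∀ x ∈ ls.takeWhile pvBlank, pvBlank x = true := fun x hx => List.mem_takeWhile_imp hx
  have hRne : R ≠ [] := by intro h; rw [h] at hpre; simp at hpre
  have hRh : pvBlank (R.head hRne) = false := List.head_dropWhile_not pvBlank hRne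
  set B1 := R.takeWhile (fun s => !pvBlank s) with hB1def
  set R2 := R.dropWhile (fun s => !pvBlank s) with hR2def
  have hR : R = B1 ++ R2 := (List.takeWhile_append_dropWhile).symm
  have hB1 : ∀ x ∈ B1, pvBlank x = false := fun x hx => by
    have := List.mem_takeWhile_imp hx; simpa using this
  have hB1ne : B1 ≠ [] := by
    obtain ⟨rh, rt, hRc⟩ := List.exists_cons_of_ne_nil hRne
    have hrh : pvBlank rh = false := by
      have h := hRh; simp only [hRc, List.head_cons] at h; exact h
    rw [hB1def, hRc]
    simp [hrh]
  have hR2any : R2.any pvBlank = true := by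
    have hB1none : B1.any pvBlank = false := by
      simp only [List.any_eq_false]
      intro x hx
      simp [hB1 x hx]
    rw [hR, List.any_append, hB1none] at hpre
    simpa using hpre
  have hR2ne : R2 ≠ [] := by intro h; rw [h] at hR2any; simp at hR2any
  have hR2h : pvBlank (R2.head hR2ne) = true := by
    have := List.head_dropWhile_not (fun s => !pvBlank s) hR2ne
    simpa using this
  set T' := R2.reverse.takeWhile (fun s => !pvBlank s) with hT'def
  set M' := R2.reverse.dropWhile (fun s => !pvBlank s) with hM'def
  have hrev : R2.reverse = T' ++ M' := (List.takeWhile_append_dropWhile).symm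
  have hR2eq : R2 = M'.reverse ++ T'.reverse := by
    rw [← List.reverse_reverse R2, hrev, List.reverse_append]
  have hT2 : ∀ x ∈ T'.reverse, pvBlank x = false := fun x hx => by
    have := List.mem_takeWhile_imp (List.mem_reverse.mp hx : x ∈ T')
    simpa using this
  have hM'ne : M' ≠ [] := by
    intro h
    rw [h, List.append_nil] at hrev
    have : R2.any pvBlank = false := by
      rw [← List.any_reverse, hrev]
      simp only [List.any_eq_false]
      intro x hx
      have := List.mem_takeWhile_imp (hT'def ▸ hx)
      simpa using this
    rw [this] at hR2any; exact Bool.false_ne_true hR2any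
  have hMne : M'.reverse ≠ [] := by simpa using hM'ne
  have hM'h : pvBlank (M'.head hM'ne) = true := by
    have := List.head_dropWhile_not (fun s => !pvBlank s) hM'ne
    simpa using this
  refine ⟨ls.takeWhile pvBlank, B1, M'.reverse, T'.reverse, hMne, ?_, hP, hB1, hB1ne, hT2, ?_, ?_⟩
  · rw [hR, hR2eq] at hls; exact hls
  · -- head of M'.reverse = head of R2
    have hhead : (M'.reverse ++ T'.reverse).head (by simp [hMne]) = M'.reverse.head hMne := by
      rw [List.head_append_of_ne_nil]
    have : R2.head hR2ne = M'.reverse.head hMne := by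
      have := hhead
      simp only [← hR2eq] at this
      exact this
    rw [← this]; exact hR2h
  · -- last of M'.reverse = head of M'
    rw [List.getLast_reverse]
    exact hM'h

theorem pvMain (contents : String) (hpre : Pre_parse_method contents) :
    parse_method contents = parse_method_alt contents := by
  have hpre' : ((PySem.Str.splitlines contents).dropWhile pvBlank).any pvBlank = true := hpre
  obtain ⟨P, B1, M, T2, hMne, hsplit, hP, hB1, hB1ne, hT2, hMh, hMl⟩ :=
    pvDecomp (PySem.Str.splitlines contents) hpre'
  rw [pvA_eq, pvB_eq, hsplit,
      pvAcore_eq P B1 M T2 hP hB1 hB1ne hT2 hMne hMh hMl,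
      pvBcore_eq P B1 M T2 hP hB1 hB1ne hT2 hMne hMh hMl]

-- ===== VERDICT (by name: the statement is the Claim_ definition above) =====
theorem parse_method_spec : Claim_equal_parse_method := by
  intro contents _ hpre
  unfold Spec_parse_method
  exact pvMain contents hpre
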